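-- pv_equiv track=rewrite | github.com/PrivateStorageio/ZKAPAuthorizer | slipcover2coveralls.py | _to_coveralls_coverage
-- ===== SOURCE A (Python) =====
-- from typing import Iterator, Union
--
-- def _to_coveralls_coverage(
--     executed: set[int], missing: set[int]
-- ) -> list[Union[int, None]]:
--     max_line = max(max(executed, default=0), max(missing, default=0))
--     # Start at line number 1 to match slipcover's 1-based numbering.  The
--     # first result will land at index 0 in the result to match coveralls'
--     # 0-based numbering.  End at maxline + 1 so we don't miss the last line.
--     line_numbers = range(1, max_line + 2)
--     return [
--         0 if lineno in missing else 1 if lineno in executed else None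
--         for lineno in line_numbers
--     ]
-- ===== SOURCE B (Python) =====
-- def _to_coveralls_coverage(executed, missing):
--     # B: scatter into a preallocated list instead of membership-testing every
--     # line number; missing is written after executed so it takes precedence.
--     max_line = max(max(executed, default=0), max(missing, default=0))
--     result = [None] * (max_line + 1)
--     for lineno in executed:
--         if lineno >= 1:
--             result[lineno - 1] = 1
--     for lineno in missing:
--         if lineno >= 1:
--             result[lineno - 1] = 0
--     return result
-- ===== Notes on version B (the rewrite author's own statement) =====
-- stated objective: alternative
-- what changed: B preallocates the result and scatters indexed writes from the two sets (missing written last for precedence), instead of gathering by membership-testing every line number against both sets.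
import Mathlib
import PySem

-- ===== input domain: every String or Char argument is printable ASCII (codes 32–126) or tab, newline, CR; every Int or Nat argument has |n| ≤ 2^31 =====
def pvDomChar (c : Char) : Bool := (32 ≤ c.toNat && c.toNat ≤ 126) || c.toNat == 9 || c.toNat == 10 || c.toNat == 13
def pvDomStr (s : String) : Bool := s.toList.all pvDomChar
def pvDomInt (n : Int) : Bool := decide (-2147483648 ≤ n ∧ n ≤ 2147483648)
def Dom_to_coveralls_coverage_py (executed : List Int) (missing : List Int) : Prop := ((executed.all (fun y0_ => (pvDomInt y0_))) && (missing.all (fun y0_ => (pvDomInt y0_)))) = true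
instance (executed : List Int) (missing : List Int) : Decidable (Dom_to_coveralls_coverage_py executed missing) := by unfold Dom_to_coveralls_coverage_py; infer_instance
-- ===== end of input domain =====

-- B preallocates the result and scatters indexed writes from the two sets (missing last, for
-- precedence) instead of membership-testing every line number; equivalence on the return value.

-- ===== PORT A =====
def to_coveralls_coverage_py (executed : List Int) (missing : List Int) : List (Option Int) :=
  let max_line := max ((PySem.List.max? executed (fun y => y)).getD 0)
                      ((PySem.List.max? missing (fun y => y)).getD 0)
  let line_numbers := PySem.List.pyRange 1 (max_line + 2) 1
  line_numbers.map (fun lineno =>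
    if lineno ∈ missing then some 0 else if lineno ∈ executed then some 1 else none)

-- ===== PORT B =====
-- one 'for lineno in xs: if lineno >= 1: result[lineno-1] = v' loop of Source B
def pvScatter (v : Int) (xs : List Int) (r : List (Option Int)) : List (Option Int) :=
  xs.foldl (fun r lineno => if 1 ≤ lineno then r.set (lineno - 1).toNat (some v) else r) r

def to_coveralls_coverage_py_alt (executed : List Int) (missing : List Int) : List (Option Int) :=
  let max_line := max ((PySem.List.max? executed (fun y => y)).getD 0)
                      ((PySem.List.max? missing (fun y => y)).getD 0)
  let result := List.replicate (max_line + 1).toNat (none : Option Int)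
  pvScatter 0 missing (pvScatter 1 executed result)

-- ===== PRECONDITION & SPEC =====
def Spec_to_coveralls_coverage_py (executed : List Int) (missing : List Int) (out : List (Option Int)) : Prop := out = to_coveralls_coverage_py_alt executed missing
instance (executed : List Int) (missing : List Int) (out : List (Option Int)) : Decidable (Spec_to_coveralls_coverage_py executed missing out) := by unfold Spec_to_coveralls_coverage_py; infer_instance

-- ===== CLAIM (what is proved, stated in full; the proofs are below) =====
def Claim_equal_to_coveralls_coverage_py : Prop := ∀ (executed : List Int) (missing : List Int), Dom_to_coveralls_coverage_py executed missing → Spec_to_coveralls_coverage_py executed missing (to_coveralls_coverage_py executed missing)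

-- ===== LEMMAS AND PROOFS =====

theorem pvScatter_length (v : Int) (xs : List Int) (r : List (Option Int)) :
    (pvScatter v xs r).length = r.length := by
  induction xs generalizing r with
  | nil => rfl
  | cons l t ih =>
      simp only [pvScatter, List.foldl_cons] at *
      rw [ih]
      split <;> simp

theorem pvScatter_getElem? (v : Int) (xs : List Int) (r : List (Option Int)) (i : Nat) :
    (pvScatter v xs r)[i]? =
      if ((i : Int) + 1) ∈ xs ∧ i < r.length then some (some v) else r[i]? := by
  induction xs generalizing r with
  | nil => simp [pvScatter]
  | cons l t ih =>
      simp only [pvScatter, List.foldl_cons] at *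
      rw [ih]
      by_cases hl : 1 ≤ l
      · simp only [if_pos hl, List.length_set, List.getElem?_set]
        by_cases heq : l = (i : Int) + 1
        · have hj : (l - 1).toNat = i := by omega
          by_cases hlen : i < r.length
          · simp [hlen, heq, List.mem_cons]
          · simp [hlen, heq, List.mem_cons]
        · simp only [List.mem_cons]
          by_cases hm : ((i : Int) + 1) ∈ t ∧ i < r.length
          · simp [hm]
          · have : ¬ (((i : Int) + 1 = l ∨ ((i : Int) + 1) ∈ t) ∧ i < r.length) := by
              intro ⟨h1, h2⟩
              rcases h1 with h1 | h1
              · exact heq h1.symm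
              · exact hm ⟨h1, h2⟩
            simp only [hm, if_false, this]
            rw [if_neg (by omega : ¬ (l - 1).toNat = i)]
      · have heq : l ≠ (i : Int) + 1 := by omega
        simp only [if_neg hl, List.mem_cons]
        by_cases hm : ((i : Int) + 1) ∈ t ∧ i < r.length
        · simp [hm]
        · have : ¬ (((i : Int) + 1 = l ∨ ((i : Int) + 1) ∈ t) ∧ i < r.length) := by
            intro ⟨h1, h2⟩
            rcases h1 with h1 | h1
            · exact heq h1.symm
            · exact hm ⟨h1, h2⟩
          simp [hm, this]

-- ===== VERDICT (by name: the statement is the Claim_ definition above) =====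
theorem to_coveralls_coverage_py_spec : Claim_equal_to_coveralls_coverage_py := by
  intro executed missing _
  unfold Spec_to_coveralls_coverage_py to_coveralls_coverage_py to_coveralls_coverage_py_alt
  set M := max ((PySem.List.max? executed (fun y => y)).getD 0)
               ((PySem.List.max? missing (fun y => y)).getD 0) with hM
  apply List.ext_getElem?
  intro i
  rw [List.getElem?_map, pvScatter_getElem?, pvScatter_getElem?]
  simp only [pvScatter_length, List.length_replicate]
  rw [PySem.List.getElem?_pyRange_one]
  by_cases hi : i < (M + 1).toNat
  · have hrange : i < (M + 2 - 1).toNat := by omega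
    rw [if_pos hrange]
    simp only [Option.map_some, List.getElem?_replicate, if_pos hi]
    have hcomm : (1 : Int) + i = (i : Int) + 1 := by omega
    rw [hcomm]
    by_cases hm : ((i : Int) + 1) ∈ missing
    · simp [hm, hi]
    · by_cases he : ((i : Int) + 1) ∈ executed
      · simp [hm, he, hi]
      · simp [hm, he, hi]
  · have hrange : ¬ i < (M + 2 - 1).toNat := by omega
    rw [if_neg hrange]
    simp [hi]
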